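-- pv_equiv track=rewrite | github.com/FirmLeelayana/data-structures-and-algorithms | Arrays and Strings/compression.py | should_use_original
-- ===== SOURCE A (Python) =====
-- def should_use_original(input_string):
--     """Checks if the compression will lead to same length regardless."""
--     original_length = len(input_string)
--     compressed_length = 2
--     letter = input_string[0]
--
--     for i in range(1, len(input_string)):
--         if letter != input_string[i]:
--             compressed_length += 2
--             letter = input_string[i]
--
--     if original_length <= compressed_length:
--         return True
--     else:
--         return False
-- ===== SOURCE B (Python) =====
-- def should_use_original(input_string):
--     """Checks if the compression will lead to same length regardless.
--
--     Counts the runs of equal consecutive characters by repeatedly stripping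
--     the whole leading run with str.lstrip(first_char); the compressed length
--     is 2 * number_of_runs, so the original wins iff len(s) <= 2 * runs.
--     """
--     num_runs = 0
--     t = input_string
--     while t:
--         num_runs += 1
--         t = t.lstrip(t[0])
--     return len(input_string) <= 2 * num_runs
-- ===== Notes on version B (the rewrite author's own statement) =====
-- stated objective: alternative
-- what changed: B counts runs by a loop that strips the whole leading run with str.lstrip(first_char) at each step and compares len(s) <= 2*runs, instead of A's indexed character-by-character loop tracking the current letter and accumulating the compressed length.
-- crash fix: On the empty string A raises IndexError (input_string[0]); B returns True (zero runs, 0 <= 0). — e.g. on should_use_original(""): A raises IndexError, B returns true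
import Mathlib
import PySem

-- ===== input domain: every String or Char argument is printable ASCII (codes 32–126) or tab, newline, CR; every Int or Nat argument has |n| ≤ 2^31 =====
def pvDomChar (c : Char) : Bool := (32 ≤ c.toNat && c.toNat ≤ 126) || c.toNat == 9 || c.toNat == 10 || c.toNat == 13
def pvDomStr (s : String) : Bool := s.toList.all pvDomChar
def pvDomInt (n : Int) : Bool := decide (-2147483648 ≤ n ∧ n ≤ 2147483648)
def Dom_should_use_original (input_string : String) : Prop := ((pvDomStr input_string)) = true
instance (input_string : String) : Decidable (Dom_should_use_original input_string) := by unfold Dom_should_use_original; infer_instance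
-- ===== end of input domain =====

-- B counts runs by repeatedly stripping the leading run (lstrip of the first
-- character) and compares len(s) <= 2*runs; an alternative run-based strategy
-- instead of A's indexed per-character loop.  Equal return values on every
-- non-empty string; on "" A raises IndexError while B returns true.

-- ===== PORT A =====
def should_use_original (input_string : String) : Bool :=
  let cs := input_string.toList
  let original_length : Int := cs.length
  match PySem.Str.pyGet? input_string 0 with
  | none => false  -- IndexError on the empty string; excluded by Pre_
  | some letter0 =>
    let st := (PySem.List.pyRange 1 (cs.length : Int) 1).foldl
      (fun (st : Int × Char) i =>
        if st.2 ≠ PySem.List.pyGetD cs i ' ' then (st.1 + 2, PySem.List.pyGetD cs i ' ')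
        else st)
      (2, letter0)
    decide (original_length ≤ st.1)

-- ===== PORT B =====
-- B's while loop: strip the leading run (lstrip with the first char = dropWhile
-- equal to it, exact for a one-character lstrip argument) until empty, counting.
def pvNumRuns : List Char → Nat
  | [] => 0
  | c :: rest => 1 + pvNumRuns (rest.dropWhile (· == c))
termination_by l => l.length
decreasing_by
  simp only [List.length_cons]
  exact Nat.lt_succ_of_le (List.length_dropWhile_le _ _)

def should_use_original_alt (input_string : String) : Bool :=
  decide ((input_string.toList.length : Int) ≤ 2 * (pvNumRuns input_string.toList : Int))

-- ===== PRECONDITION & SPEC =====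
-- Pre_ excludes only the empty string, on which A raises IndexError.
def Pre_should_use_original (input_string : String) : Prop := input_string ≠ ""
instance (input_string : String) : Decidable (Pre_should_use_original input_string) := by unfold Pre_should_use_original; infer_instance
def pvWitness_should_use_original : String := "aab"
-- On the empty string A raises IndexError (input_string[0]); B returns true.
def Raises_should_use_original (input_string : String) : Prop := input_string = ""
instance (input_string : String) : Decidable (Raises_should_use_original input_string) := by unfold Raises_should_use_original; infer_instance
def pvRaiseWitness_should_use_original : String := ""
def pvRaiseWitnessOut_should_use_original : Bool := true
def Spec_should_use_original (input_string : String) (out : Bool) : Prop := out = should_use_original_alt input_string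
instance (input_string : String) (out : Bool) : Decidable (Spec_should_use_original input_string out) := by unfold Spec_should_use_original; infer_instance

-- ===== CLAIM =====
def Claim_equal_should_use_original : Prop := ∀ (input_string : String), Dom_should_use_original input_string → Pre_should_use_original input_string → Spec_should_use_original input_string (should_use_original input_string)
def Claim_raises_should_use_original : Prop := (∀ (input_string : String), Dom_should_use_original input_string → Raises_should_use_original input_string → ¬ Pre_should_use_original input_string) ∧ (Dom_should_use_original (pvRaiseWitness_should_use_original) ∧ Raises_should_use_original (pvRaiseWitness_should_use_original) ∧ should_use_original_alt (pvRaiseWitness_should_use_original) = pvRaiseWitnessOut_should_use_original)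

-- ===== LEMMAS AND PROOFS =====

-- number of run transitions in a list, given the previous character
def pvTrans : Char → List Char → Nat
  | _, [] => 0
  | p, c :: cs => (if p ≠ c then 1 else 0) + pvTrans c cs

-- A's loop body, abstracted over the current character
def pvStepA (st : Int × Char) (c : Char) : Int × Char :=
  if st.2 ≠ c then (st.1 + 2, c) else st

lemma pvFoldA (rest : List Char) : ∀ (c0 : Char) (acc : Int),
    (rest.foldl pvStepA (acc, c0)).1 = acc + 2 * pvTrans c0 rest := by
  induction rest with
  | nil => intro c0 acc; simp [pvTrans]
  | cons c t ih =>
    intro c0 acc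
    by_cases h : c0 = c
    · simp [pvStepA, pvTrans, h, ih]
    · simp [pvStepA, pvTrans, h, ih]
      ring

-- run counting by leading-run stripping equals 1 + transitions
lemma pvNumRuns_cons (rest : List Char) : ∀ (c0 : Char),
    pvNumRuns (c0 :: rest) = 1 + pvTrans c0 rest := by
  induction rest with
  | nil => intro c0; simp [pvNumRuns, pvTrans]
  | cons c t ih =>
    intro c0
    by_cases h : c0 = c
    · subst h
      have h1 : pvNumRuns (c0 :: c0 :: t) = pvNumRuns (c0 :: t) := by
        simp [pvNumRuns, List.dropWhile]
      rw [h1, ih c0]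
      simp [pvTrans]
    · have h1 : pvNumRuns (c0 :: c :: t) = 1 + pvNumRuns (c :: t) := by
        have : (c :: t).dropWhile (· == c0) = c :: t := by
          rw [List.dropWhile_cons_of_neg]
          simp [Ne.symm h]
        simp [pvNumRuns, this]
      rw [h1, ih c]
      simp [pvTrans, h]

-- ===== VERDICT =====
theorem should_use_original_spec : Claim_equal_should_use_original := by
  intro s _ hpre
  unfold Spec_should_use_original should_use_original should_use_original_alt
  have hne : s.toList ≠ [] := fun h => hpre (String.toList_eq_nil_iff.mp h)
  obtain ⟨c0, rest, hcs⟩ : ∃ c0 rest, s.toList = c0 :: rest := by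
    cases h : s.toList with
    | nil => exact absurd h hne
    | cons a t => exact ⟨a, t, rfl⟩
  have hget : PySem.Str.pyGet? s 0 = some c0 := by
    have : ((0 : Nat) : Int) = (0 : Int) := rfl
    rw [← this, PySem.Str.pyGet?_natCast, hcs]
    rfl
  rw [hget]
  simp only [hcs]
  have hfold : (PySem.List.pyRange 1 ((c0 :: rest).length : Int) 1).foldl
      (fun (st : Int × Char) i =>
        if st.2 ≠ PySem.List.pyGetD (c0 :: rest) i ' ' then (st.1 + 2, PySem.List.pyGetD (c0 :: rest) i ' ')
        else st)
      (2, c0) = ((c0 :: rest).drop (1 : Int).toNat).foldl pvStepA (2, c0) := by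
    exact PySem.List.foldl_pyRange_pyGetD' (c0 :: rest) ' ' pvStepA (2, c0) (a := 1) (by norm_num)
  simp only [hfold]
  simp only [Int.toNat_one, List.drop_one, List.tail_cons]
  rw [pvFoldA rest c0 2, pvNumRuns_cons rest c0]
  simp only [List.length_cons, decide_eq_decide]
  push_cast
  omega

def should_use_original_raises : Claim_raises_should_use_original := by
  unfold Claim_raises_should_use_original
  exact ⟨fun s _ hr hp => hp hr, by decide⟩
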